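-- pv_equiv track=rewrite | github.com/WalterB007/nexsentia-mvp | backend/nexsentia/nlp/cleaning.py | split_thread
-- ===== SOURCE A (Python) =====
-- from typing import Tuple
--
-- def split_thread(text: str) -> Tuple[str, str]:
--     lines = text.splitlines()
--     main_lines = []
--     history_lines = []
--     in_history = False
--
--     for line in lines:
--         stripped = line.strip()
--         if not in_history and (
--             (stripped.startswith("On ") and " wrote:" in stripped)
--             or stripped.startswith("From:")
--             or stripped.startswith("Sent:")
--             or stripped.startswith("De :")
--         ):
--             in_history = True
--
--         if in_history:
--             history_lines.append(line)
--         else: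
--             main_lines.append(line)
--
--     return "\n".join(main_lines).strip(), "\n".join(history_lines).strip()
-- ===== SOURCE B (Python) =====
-- def split_thread(text):
--     lines = text.splitlines()
--
--     def is_marker(line):
--         s = line.strip()
--         return ((s.startswith("On ") and " wrote:" in s)
--                 or s.startswith("From:")
--                 or s.startswith("Sent:")
--                 or s.startswith("De :"))
--
--     i = next((k for k, line in enumerate(lines) if is_marker(line)), len(lines))
--     return "\n".join(lines[:i]).strip(), "\n".join(lines[i:]).strip()
-- ===== Notes on version B (the rewrite author's own statement) =====
-- stated objective: simpler
-- what changed: Replaces the sticky in_history flag and per-line branch/append with finding the index of the first history-marker line and slicing the line list there.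
import Mathlib
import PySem

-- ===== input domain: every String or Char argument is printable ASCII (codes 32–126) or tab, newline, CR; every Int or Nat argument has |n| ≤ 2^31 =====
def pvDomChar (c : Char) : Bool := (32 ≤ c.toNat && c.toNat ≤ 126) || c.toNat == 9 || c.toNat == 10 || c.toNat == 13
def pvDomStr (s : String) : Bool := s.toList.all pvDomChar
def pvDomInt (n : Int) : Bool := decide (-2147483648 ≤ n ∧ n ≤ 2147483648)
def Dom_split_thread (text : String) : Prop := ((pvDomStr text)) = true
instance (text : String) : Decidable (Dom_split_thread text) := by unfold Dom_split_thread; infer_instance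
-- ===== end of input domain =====

-- B replaces A's sticky in_history flag with find-first-marker-index then slice; objective: simpler.

-- ===== PORT A =====
-- A's per-line loop body: strip, maybe flip the sticky flag, append to main or history.
def pvStepA (st : List String × List String × Bool) (line : String) :
    List String × List String × Bool :=
  let stripped := PySem.Str.strip line
  let inHist :=
    if !st.2.2 &&
        ((PySem.Str.startswith stripped "On " && PySem.Str.isIn " wrote:" stripped)
          || PySem.Str.startswith stripped "From:"
          || PySem.Str.startswith stripped "Sent:"
          || PySem.Str.startswith stripped "De :") then
      true
    else st.2.2
  if inHist then (st.1, st.2.1 ++ [line], inHist) else (st.1 ++ [line], st.2.1, inHist)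

def split_thread (text : String) : String × String :=
  let lines := PySem.Str.splitlines text
  let res := lines.foldl pvStepA ([], [], false)
  (PySem.Str.strip (PySem.Str.join "\n" res.1), PySem.Str.strip (PySem.Str.join "\n" res.2.1))

-- ===== PORT B =====
-- B's marker predicate (is_marker in Source B).
def pvIsMarker (line : String) : Bool :=
  let s := PySem.Str.strip line
  (PySem.Str.startswith s "On " && PySem.Str.isIn " wrote:" s)
    || PySem.Str.startswith s "From:"
    || PySem.Str.startswith s "Sent:"
    || PySem.Str.startswith s "De :"

def split_thread_alt (text : String) : String × String :=
  let lines := PySem.Str.splitlines text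
  -- index of the first marker line, defaulting to lines.length when none matches
  let i := lines.findIdx pvIsMarker
  (PySem.Str.strip (PySem.Str.join "\n" (lines.take i)),
   PySem.Str.strip (PySem.Str.join "\n" (lines.drop i)))

-- ===== PRECONDITION & SPEC =====
def Spec_split_thread (text : String) (out : String × String) : Prop := out = split_thread_alt text
instance (text : String) (out : String × String) : Decidable (Spec_split_thread text out) := by unfold Spec_split_thread; infer_instance

-- ===== CLAIM (what is proved, stated in full; the proofs are below) =====
def Claim_equal_split_thread : Prop := ∀ (text : String), Dom_split_thread text → Spec_split_thread text (split_thread text)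

-- ===== LEMMAS AND PROOFS =====

-- One step of A's loop with the flag unset: append to history (setting the flag)
-- exactly when the line is a marker line.
theorem pvStepA_false (main hist : List String) (l : String) :
    pvStepA (main, hist, false) l =
      if pvIsMarker l then (main, hist ++ [l], true) else (main ++ [l], hist, false) := by
  unfold pvStepA pvIsMarker
  cases hC : ((PySem.Str.startswith (PySem.Str.strip l) "On "
        && PySem.Str.isIn " wrote:" (PySem.Str.strip l))
      || PySem.Str.startswith (PySem.Str.strip l) "From:"
      || PySem.Str.startswith (PySem.Str.strip l) "Sent:"
      || PySem.Str.startswith (PySem.Str.strip l) "De :") <;> simp_all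

-- One step of A's loop with the flag set: the line goes to history.
theorem pvStepA_true (main hist : List String) (l : String) :
    pvStepA (main, hist, true) l = (main, hist ++ [l], true) := by
  unfold pvStepA; simp

-- Once the flag is set, every remaining line goes to history.
theorem pvFoldA_true (lines main hist : List String) :
    lines.foldl pvStepA (main, hist, true) = (main, hist ++ lines, true) := by
  induction lines generalizing hist with
  | nil => simp
  | cons l ls ih => simp [pvStepA_true, ih]

-- With the flag unset, the fold splits at the first marker line.
theorem pvFoldA_false (lines main hist : List String) :
    lines.foldl pvStepA (main, hist, false) =
      (main ++ lines.take (lines.findIdx pvIsMarker),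
       hist ++ lines.drop (lines.findIdx pvIsMarker),
       lines.any pvIsMarker) := by
  induction lines generalizing main hist with
  | nil => simp
  | cons l ls ih =>
    by_cases h : pvIsMarker l = true
    · simp [List.foldl_cons, pvStepA_false, List.findIdx_cons, h, pvFoldA_true]
    · simp [List.foldl_cons, pvStepA_false, List.findIdx_cons, h, ih]

-- ===== VERDICT (by name: the statement is the Claim_ definition above) =====
theorem split_thread_spec : Claim_equal_split_thread := by
  intro text _
  unfold Spec_split_thread split_thread split_thread_alt
  simp [pvFoldA_false]
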